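-- pv_equiv track=rewrite | github.com/d0tat0/dockerShocker | mchs/scripts/core/data_utils.py | distribute_splice_files
-- ===== SOURCE A (Python) =====
-- def distribute_splice_files(max_bins, info_list):
--     splice_dict = {}
--     bin_dict = dict([(i, []) for i in range(max_bins)])
--     i = 0
--     for info in info_list:
--         file_type, start_patient_id, source_file_name = info
--         old_bin = splice_dict.get(start_patient_id, -1)
--         if old_bin >= 0:
--             new_bin = old_bin
--         else:
--             new_bin = i
--             splice_dict[start_patient_id] = new_bin
--             i = (i + 1) % max_bins
--         bin_dict[new_bin].append(info)
--     return bin_dict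
-- ===== SOURCE B (Python) =====
-- def distribute_splice_files(max_bins, info_list):
--     bin_of = {}
--     for _, patient_id, _ in info_list:
--         if patient_id not in bin_of:
--             bin_of[patient_id] = len(bin_of) % max_bins
--     bin_dict = {b: [] for b in range(max_bins)}
--     for info in info_list:
--         bin_dict[bin_of[info[1]]].append(info)
--     return bin_dict
-- ===== Notes on version B (the rewrite author's own statement) =====
-- stated objective: alternative
-- what changed: B replaces A's single pass threading a stepped counter i=(i+1)%max_bins with a two-pass decomposition: pass 1 builds a patient_id->bin table where each newly seen patient gets (number of previously seen distinct patients) % max_bins, pass 2 groups the infos by table lookup.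
import Mathlib
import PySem

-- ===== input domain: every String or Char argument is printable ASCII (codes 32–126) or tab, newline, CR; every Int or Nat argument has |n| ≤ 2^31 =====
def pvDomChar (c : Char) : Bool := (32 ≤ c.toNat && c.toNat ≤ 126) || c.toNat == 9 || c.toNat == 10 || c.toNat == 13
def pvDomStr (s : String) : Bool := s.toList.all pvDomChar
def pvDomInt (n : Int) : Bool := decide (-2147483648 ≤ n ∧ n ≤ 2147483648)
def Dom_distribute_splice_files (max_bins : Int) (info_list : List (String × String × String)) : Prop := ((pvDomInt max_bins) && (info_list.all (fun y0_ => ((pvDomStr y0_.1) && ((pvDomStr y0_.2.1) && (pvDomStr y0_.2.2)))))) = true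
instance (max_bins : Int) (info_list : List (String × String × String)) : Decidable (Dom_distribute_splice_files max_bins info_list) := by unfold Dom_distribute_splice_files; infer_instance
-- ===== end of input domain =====

-- B replaces A's single pass threading a stepped counter by a two-pass decomposition:
-- a table pass assigning each newly seen patient the bin (number of previously seen distinct patients) % max_bins,
-- then a grouping pass; objective: alternative (same cost, different structure).

-- ===== PORT A =====
-- single pass; state = (splice_dict, bin_dict, i); `bin_dict[new_bin].append` is exact
-- (Dict.modify) whenever the key is present, which Pre_ guarantees; i = (i+1) % max_bins
-- is PySem.Int.mod (Python-exact; max_bins = 0 is excluded by Pre_, where Python raises).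
def distribute_splice_files (max_bins : Int) (info_list : List (String × String × String)) : List (Int × List (String × String × String)) :=
  let init : PySem.Dict Int (List (String × String × String)) :=
    PySem.Dict.ofList ((PySem.List.pyRange 0 max_bins 1).map (fun i => (i, [])))
  let st := info_list.foldl
    (fun (st : PySem.Dict String Int × PySem.Dict Int (List (String × String × String)) × Int) info =>
      let (splice_dict, bin_dict, i) := st
      let old_bin := splice_dict.getD info.2.1 (-1)
      if old_bin ≥ 0 then
        (splice_dict, bin_dict.modify old_bin [] (· ++ [info]), i)
      else
        (splice_dict.insert info.2.1 i, bin_dict.modify i [] (· ++ [info]),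
         PySem.Int.mod (i + 1) max_bins))
    (PySem.Dict.empty, init, 0)
  st.2.1.items

-- ===== PORT B =====
-- pass 1: patient_id → bin table; pass 2: group by table lookup (key always present; getD exact).
def distribute_splice_files_alt (max_bins : Int) (info_list : List (String × String × String)) : List (Int × List (String × String × String)) :=
  let bin_of : PySem.Dict String Int := info_list.foldl
    (fun d info =>
      if d.contains info.2.1 then d
      else d.insert info.2.1 (PySem.Int.mod (d.size : Int) max_bins))
    PySem.Dict.empty
  let init : PySem.Dict Int (List (String × String × String)) :=
    PySem.Dict.ofList ((PySem.List.pyRange 0 max_bins 1).map (fun i => (i, [])))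
  (info_list.foldl
    (fun bin_dict info => bin_dict.modify (bin_of.getD info.2.1 0) [] (· ++ [info]))
    init).items

-- ===== PRECONDITION & SPEC =====
-- Pre_ excludes max_bins ≤ 0 with a nonempty info_list: there A raises
-- (ZeroDivisionError for max_bins == 0, KeyError for negative max_bins).
def Pre_distribute_splice_files (max_bins : Int) (info_list : List (String × String × String)) : Prop :=
  info_list = [] ∨ 0 < max_bins
instance (max_bins : Int) (info_list : List (String × String × String)) : Decidable (Pre_distribute_splice_files max_bins info_list) := by unfold Pre_distribute_splice_files; infer_instance
def pvWitness_distribute_splice_files : Int × (List (String × String × String)) :=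
  (2, [("bam", "p1", "f1"), ("bam", "p2", "f2"), ("bam", "p1", "f3")])
def Spec_distribute_splice_files (max_bins : Int) (info_list : List (String × String × String)) (out : List (Int × List (String × String × String))) : Prop := out = distribute_splice_files_alt max_bins info_list
instance (max_bins : Int) (info_list : List (String × String × String)) (out : List (Int × List (String × String × String))) : Decidable (Spec_distribute_splice_files max_bins info_list out) := by unfold Spec_distribute_splice_files; infer_instance

-- ===== CLAIM (what is proved, stated in full; the proofs are below) =====
def Claim_equal_distribute_splice_files : Prop := ∀ (max_bins : Int) (info_list : List (String × String × String)), Dom_distribute_splice_files max_bins info_list → Pre_distribute_splice_files max_bins info_list → Spec_distribute_splice_files max_bins info_list (distribute_splice_files max_bins info_list)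

-- ===== LEMMAS AND PROOFS =====

-- B's table-building step, as a named function (abbreviation of the fold step in the B port).
def pvStep (max_bins : Int) (d : PySem.Dict String Int) (info : String × String × String) : PySem.Dict String Int :=
  if d.contains info.2.1 then d
  else d.insert info.2.1 (PySem.Int.mod (d.size : Int) max_bins)

-- once a key is in the table, the table fold never changes its value
theorem pvStep_persist (max_bins : Int) (l : List (String × String × String))
    (d : PySem.Dict String Int) (k : String) (hk : d.contains k = true) :
    (l.foldl (pvStep max_bins) d).get? k = d.get? k := by
  induction l generalizing d with
  | nil => rfl
  | cons info rest ih =>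
    simp only [List.foldl_cons]
    by_cases hc : d.contains info.2.1
    · rw [pvStep, if_pos hc, ih d hk]
    · rw [pvStep, if_neg hc]
      have hkc : (d.insert info.2.1 (PySem.Int.mod (d.size : Int) max_bins)).contains k := by
        rw [PySem.Dict.contains_insert]; simp [hk]
      rw [ih _ hkc]
      have hne : k ≠ info.2.1 := by
        intro h; rw [h] at hk; exact hc hk
      exact PySem.Dict.get?_insert_of_ne _ _ hne

-- main invariant: A's single pass over l, started at (splice, bins, splice.size % max_bins),
-- produces the same bin dict as B's grouping pass over l using the completed table.
theorem pvMain (max_bins : Int) (hm : 0 < max_bins) (l : List (String × String × String))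
    (splice : PySem.Dict String Int)
    (bins : PySem.Dict Int (List (String × String × String))) (i : Int)
    (hi : i = PySem.Int.mod (splice.size : Int) max_bins)
    (hval : ∀ k, splice.contains k = true → 0 ≤ splice.getD k (-1)) :
    (l.foldl
      (fun (st : PySem.Dict String Int × PySem.Dict Int (List (String × String × String)) × Int) info =>
        let (splice_dict, bin_dict, i) := st
        let old_bin := splice_dict.getD info.2.1 (-1)
        if old_bin ≥ 0 then
          (splice_dict, bin_dict.modify old_bin [] (· ++ [info]), i)
        else
          (splice_dict.insert info.2.1 i, bin_dict.modify i [] (· ++ [info]),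
           PySem.Int.mod (i + 1) max_bins))
      (splice, bins, i)).2.1
    = l.foldl
        (fun bin_dict info =>
          bin_dict.modify ((l.foldl (pvStep max_bins) splice).getD info.2.1 0) [] (· ++ [info]))
        bins := by
  induction l generalizing splice bins i with
  | nil => rfl
  | cons info rest ih =>
    simp only [List.foldl_cons]
    by_cases hc : splice.contains info.2.1
    · -- old patient: bin is its stored value, table unchanged
      have h0 : 0 ≤ splice.getD info.2.1 (-1) := hval _ hc
      rw [pvStep, if_pos hc]
      have hget : (rest.foldl (pvStep max_bins) splice).getD info.2.1 0
          = splice.getD info.2.1 (-1) := by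
        rw [PySem.Dict.getD_eq_get?_getD, PySem.Dict.getD_eq_get?_getD,
            pvStep_persist max_bins rest splice _ hc]
        rcases hopt : splice.get? info.2.1 with _ | v
        · rw [PySem.Dict.contains_eq_isSome_get?, hopt] at hc; simp at hc
        · rfl
      simp only [ge_iff_le, h0, if_true, hget]
      exact ih splice _ i hi hval
    · -- new patient: gets bin splice.size % max_bins, table extended
      have hneg : splice.getD info.2.1 (-1) = -1 :=
        PySem.Dict.getD_of_not_contains _ _ (by simpa using hc)
      rw [pvStep, if_neg hc, ← hi]
      simp only [hneg, ge_iff_le]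
      rw [if_neg (by omega)]
      set splice' := splice.insert info.2.1 i with hs'
      have hval' : ∀ k, splice'.contains k = true → 0 ≤ splice'.getD k (-1) := by
        intro k hk
        rw [hs', PySem.Dict.getD_insert]
        split_ifs with he
        · rw [hi]; exact PySem.Int.mod_nonneg _ hm
        · apply hval
          rw [hs', PySem.Dict.contains_insert] at hk
          simpa [he] using hk
      have hsz : PySem.Int.mod (i + 1) max_bins
          = PySem.Int.mod ((splice'.size : Int)) max_bins := by
        have h1 : splice'.size = splice.size + 1 := by
          rw [hs', PySem.Dict.size_insert, if_neg (by simpa using hc)]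
        rw [h1, hi]
        push_cast
        rw [PySem.Int.mod_eq_emod_of_pos hm, PySem.Int.mod_eq_emod_of_pos hm,
            PySem.Int.mod_eq_emod_of_pos hm]
        rw [Int.emod_add_emod]
      have hgetv : (rest.foldl (pvStep max_bins) splice').getD info.2.1 0 = i := by
        rw [PySem.Dict.getD_eq_get?_getD,
            pvStep_persist max_bins rest splice' _ (by rw [hs']; exact PySem.Dict.contains_insert_self _ _ _),
            hs', PySem.Dict.get?_insert_self]
        rfl
      rw [hgetv, hsz]
      exact ih splice' _ _ rfl hval'

-- ===== VERDICT (by name: the statement is the Claim_ definition above) =====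
theorem distribute_splice_files_spec : Claim_equal_distribute_splice_files := by
  intro max_bins info_list _ hpre
  unfold Spec_distribute_splice_files distribute_splice_files distribute_splice_files_alt
  rcases hpre with hnil | hm
  · subst hnil; rfl
  · have h0 : (0 : Int) = PySem.Int.mod ((PySem.Dict.empty : PySem.Dict String Int).size : Int) max_bins := by
      show (0 : Int) = PySem.Int.mod 0 max_bins
      rw [PySem.Int.mod_eq_emod_of_pos hm]; simp
    exact congrArg PySem.Dict.items (pvMain max_bins hm info_list PySem.Dict.empty
      (PySem.Dict.ofList ((PySem.List.pyRange 0 max_bins 1).map (fun i => (i, [])))) 0 h0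
      (by intro k hk; rw [PySem.Dict.contains_empty] at hk; exact absurd hk (by simp)))
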